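-- pv_equiv track=rewrite | github.com/shreya726/digaai-ml | processing_matrix.py | get_3grams
-- ===== SOURCE A (Python) =====
-- MAX_NAME_LENGTH = 10
--
-- def get_3grams(name):
-- 	""" Get 3-grams of names
-- 	"""
-- 	name = name[2:-1]
-- 	grams = [name[i:i+3] for i in range(0, len(name) - 2)]
-- 	if len(grams) < MAX_NAME_LENGTH:
-- 		grams += ['QQQ'] * (MAX_NAME_LENGTH - len(grams))
-- 	elif len(grams) > MAX_NAME_LENGTH:
-- 		grams = grams[:10]
--
-- 	return grams
-- ===== SOURCE B (Python) =====
-- MAX_NAME_LENGTH = 10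
--
-- def get_3grams(name):
--     """ Get 3-grams of names """
--     def go(cs, k):
--         if k == 0:
--             return []
--         if len(cs) >= 3:
--             return [cs[0] + cs[1] + cs[2]] + go(cs[1:], k - 1)
--         return ['QQQ'] * k
--     return go(list(name[2:-1]), MAX_NAME_LENGTH)
-- ===== Notes on version B (the rewrite author's own statement) =====
-- stated objective: alternative
-- what changed: B replaces A's build-all-grams-then-pad/truncate list comprehension with a structural recursion over the character list carrying a countdown of 10: it emits a trigram while at least 3 chars remain and the budget is positive, then fills the remaining budget with the padding gram, so A's pad/truncate if/elif disappears and at most 10 grams are ever built.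
import Mathlib
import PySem

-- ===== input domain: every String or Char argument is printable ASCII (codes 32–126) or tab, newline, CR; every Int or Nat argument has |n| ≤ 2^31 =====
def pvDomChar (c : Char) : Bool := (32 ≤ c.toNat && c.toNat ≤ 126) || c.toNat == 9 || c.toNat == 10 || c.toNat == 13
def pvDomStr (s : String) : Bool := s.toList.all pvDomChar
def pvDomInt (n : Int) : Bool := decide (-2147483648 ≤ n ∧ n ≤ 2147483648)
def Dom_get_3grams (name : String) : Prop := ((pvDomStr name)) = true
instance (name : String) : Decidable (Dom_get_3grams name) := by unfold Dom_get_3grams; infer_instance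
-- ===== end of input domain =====

-- B replaces A's build-then-pad/truncate shape by a countdown recursion that emits at most 10 grams; same return value.

-- ===== PORT A =====
def get_3grams (name : String) : List String :=
  let name2 := PySem.Str.slice name (some 2) (some (-1))
  let grams := (PySem.List.pyRange 0 (PySem.Str.len name2 - 2) 1).map
      (fun i => PySem.Str.slice name2 (some i) (some (i + 3)))
  if grams.length < 10 then grams ++ List.replicate (10 - grams.length) "QQQ"
  else if grams.length > 10 then PySem.List.slice grams none (some 10)
  else grams

-- ===== PORT B =====
-- go(cs, k): the inner recursion of Source B over the char list; cs[0]+cs[1]+cs[2] of single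
-- chars is ported exactly as String.ofList [c1, c2, c3].
def altGo : List Char → Nat → List String
  | _, 0 => []
  | c1 :: c2 :: c3 :: rest, k + 1 => String.ofList [c1, c2, c3] :: altGo (c2 :: c3 :: rest) k
  | _, k + 1 => List.replicate (k + 1) "QQQ"

def get_3grams_alt (name : String) : List String :=
  altGo (PySem.Str.slice name (some 2) (some (-1))).toList 10

-- ===== PRECONDITION & SPEC =====
def Spec_get_3grams (name : String) (out : List String) : Prop := out = get_3grams_alt name
instance (name : String) (out : List String) : Decidable (Spec_get_3grams name out) := by unfold Spec_get_3grams; infer_instance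

-- ===== CLAIM (what is proved, stated in full; the proofs are below) =====
def Claim_equal_get_3grams : Prop := ∀ (name : String), Dom_get_3grams name → Spec_get_3grams name (get_3grams name)

-- ===== LEMMAS AND PROOFS =====

-- The full trigram list of a char list (proof-side characterisation of both programs).
def pvTg : List Char → List String
  | c1 :: c2 :: c3 :: rest => String.ofList [c1, c2, c3] :: pvTg (c2 :: c3 :: rest)
  | _ => []

theorem pvTg_length (cs : List Char) : (pvTg cs).length = cs.length - 2 := by
  induction cs using pvTg.induct with
  | case1 c1 c2 c3 rest ih => simp [pvTg, ih]
  | case2 cs h => cases cs with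
    | nil => simp [pvTg]
    | cons a t => cases t with
      | nil => simp [pvTg]
      | cons b u => cases u with
        | nil => simp [pvTg]
        | cons c v => exact absurd rfl (h a b c v)

-- B's recursion = take k of the trigram list, padded with "QQQ".
theorem altGo_eq (cs : List Char) (k : Nat) :
    altGo cs k = (pvTg cs).take k ++ List.replicate (k - (pvTg cs).length) "QQQ" := by
  induction cs using pvTg.induct generalizing k with
  | case1 c1 c2 c3 rest ih =>
    cases k with
    | zero => simp [altGo]
    | succ k => simp [altGo, pvTg, ih k]
  | case2 cs h =>
    have htg : pvTg cs = [] := by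
      cases cs with
      | nil => rfl
      | cons a t => cases t with
        | nil => rfl
        | cons b u => cases u with
          | nil => rfl
          | cons c v => exact absurd rfl (h a b c v)
    cases k with
    | zero => simp [altGo, htg]
    | succ k =>
      cases cs with
      | nil => simp [altGo, htg]
      | cons a t => cases t with
        | nil => simp [altGo, htg]
        | cons b u => cases u with
          | nil => simp [altGo, htg]
          | cons c v => exact absurd rfl (h a b c v)

-- A's comprehension = the trigram list.
theorem pvTg_eq_range (cs : List Char) :
    (List.range (cs.length - 2)).map (fun j => String.ofList ((cs.drop j).take 3)) = pvTg cs := by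
  induction cs using pvTg.induct with
  | case1 c1 c2 c3 rest ih =>
    have hl : (c1 :: c2 :: c3 :: rest).length - 2 = ((c2 :: c3 :: rest).length - 2) + 1 := by
      simp
    rw [hl, List.range_succ_eq_map, List.map_cons, List.map_map]
    simp only [pvTg]
    congr 1
  | case2 cs h => cases cs with
    | nil => simp [pvTg]
    | cons a t => cases t with
      | nil => simp [pvTg]
      | cons b u => cases u with
        | nil => simp [pvTg]
        | cons c v => exact absurd rfl (h a b c v)

-- A single trigram slice name2[j:j+3] as drop/take on the char list.
theorem pvSlice3 (s : String) (j : Nat) :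
    PySem.Str.slice s (some (j : Int)) (some ((j : Int) + 3)) =
      String.ofList ((s.toList.drop j).take 3) := by
  unfold PySem.Str.slice
  refine congrArg String.ofList ?_
  rw [PySem.Chars.slice_eq_listSlice]
  exact_mod_cast PySem.List.slice_natCast_add s.toList j 3

-- ===== VERDICT (by name: the statement is the Claim_ definition above) =====
theorem get_3grams_spec : Claim_equal_get_3grams := by
  intro name _
  unfold Spec_get_3grams get_3grams get_3grams_alt
  dsimp only
  set cs := (PySem.Str.slice name (some 2) (some (-1))).toList with hcs
  have hlen : PySem.Str.len (PySem.Str.slice name (some 2) (some (-1))) = (cs.length : Int) := by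
    simp [PySem.Str.len, hcs]
  rw [hlen]
  have hA : (PySem.List.pyRange 0 ((cs.length : Int) - 2) 1).map
      (fun i => PySem.Str.slice (PySem.Str.slice name (some 2) (some (-1))) (some i) (some (i + 3))) =
      pvTg cs := by
    rw [PySem.List.pyRange_one]
    have h2 : (((cs.length : Int) - 2) - 0).toNat = cs.length - 2 := by omega
    rw [h2, ← pvTg_eq_range cs, List.map_map]
    refine List.map_congr_left (fun j hj => ?_)
    simp only [Function.comp_apply, zero_add]
    exact pvSlice3 _ j
  rw [hA, altGo_eq cs 10, pvTg_length cs]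
  by_cases h1 : cs.length - 2 < 10
  · rw [if_pos h1, List.take_of_length_le (by rw [pvTg_length]; omega)]
  · rw [if_neg h1]
    by_cases h2 : cs.length - 2 > 10
    · rw [if_pos h2, PySem.List.slice_to _ (by norm_num : (0:Int) ≤ 10)]
      have hrep : 10 - (cs.length - 2) = 0 := by omega
      rw [hrep]
      simp
    · rw [if_neg h2]
      have he : cs.length - 2 = 10 := by omega
      rw [he]
      simp [List.take_of_length_le, pvTg_length, he]
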